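-- pv_equiv track=rewrite | github.com/maheer425/connect_4 | Heuristics.py | horizontal_winning_row
-- ===== SOURCE A (Python) =====
-- def horizontal_winning_row(board,turn,x,y):
-- 	found_color = False
-- 	found_enemy_color = False
-- 	if(turn == "red"):
-- 		enemyColor = "yellow"
-- 	else:
-- 		enemyColor = "red"
-- 	for i in range(x,x+4):
-- 		if(i>=7):
-- 			return "None"
-- 		if(board[i][y] == turn):
-- 			found_color = True
-- 		if(board[i][y] == enemyColor):
-- 			found_enemy_color = True
-- 		if(found_color and found_enemy_color):
-- 			return "None"
-- 	if(found_color):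
-- 		return turn
-- 	elif(found_enemy_color):
-- 		return enemyColor
-- 	else:
-- 		return "None"
-- ===== SOURCE B (Python) =====
-- def horizontal_winning_row(board, turn, x, y):
--     enemyColor = "yellow" if turn == "red" else "red"
--     return _classify(board, turn, enemyColor, x, min(x + 4, 7), y, None, x + 4 > 7)
--
--
-- def _classify(board, turn, enemy, i, hi, y, owner, truncated):
--     # recursively scan column y of rows i..hi-1 keeping the single color seen so far;
--     # stop with "None" as soon as a second color appears
--     if i >= hi:
--         return "None" if truncated or owner is None else owner
--     c = board[i][y]
--     if c == turn or c == enemy: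
--         if owner is not None and owner != c:
--             return "None"
--         owner = c
--     return _classify(board, turn, enemy, i + 1, hi, y, owner, truncated)
-- ===== Notes on version B (the rewrite author's own statement) =====
-- stated objective: alternative
-- what changed: Replaces A's iterative two-boolean-flag loop with in-loop bounds check by a tail-recursive scan over a range capped at min(x+4,7) that keeps a single optional 'owner' colour and reports a conflict as soon as a second colour appears, with the truncation decided once up front.
import Mathlib
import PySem

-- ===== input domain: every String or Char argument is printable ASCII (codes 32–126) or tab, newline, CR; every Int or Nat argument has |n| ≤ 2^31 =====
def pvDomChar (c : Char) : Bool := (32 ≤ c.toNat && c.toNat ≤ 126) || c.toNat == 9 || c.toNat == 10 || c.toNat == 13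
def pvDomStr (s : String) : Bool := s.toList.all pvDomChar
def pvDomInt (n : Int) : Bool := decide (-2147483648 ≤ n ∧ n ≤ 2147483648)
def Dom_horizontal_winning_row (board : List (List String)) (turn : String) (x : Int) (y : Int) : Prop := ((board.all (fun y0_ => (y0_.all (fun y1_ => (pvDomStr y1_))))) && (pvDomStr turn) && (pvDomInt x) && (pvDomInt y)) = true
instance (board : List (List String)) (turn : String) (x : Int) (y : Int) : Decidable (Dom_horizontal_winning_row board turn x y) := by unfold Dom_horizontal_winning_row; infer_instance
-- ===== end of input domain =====

-- B replaces A's two-boolean-flag loop (with the in-loop i>=7 guard) by a tail-recursive scan of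
-- the range capped at min(x+4,7) keeping one optional owner colour (objective: alternative).
-- Equivalence of RETURN values on Pre_ (exactly where Python A returns without raising).

-- board[i][y] with Python's negative-index semantics; the defaults are only reached where the
-- Python raises, i.e. outside Pre_
def pvCell (board : List (List String)) (y : Int) (i : Int) : String :=
  (PySem.List.pyGet? ((PySem.List.pyGet? board i).getD []) y).getD ""

-- ===== PORT A =====
def pvLoopA (board : List (List String)) (turn enemy : String) (y : Int) :
    List Int → Bool → Bool → String
  | [], fc, fe => if fc then turn else if fe then enemy else "None"
  | i :: rest, fc, fe =>
    if 7 ≤ i then "None"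
    else
      let c := pvCell board y i
      let fc := if c = turn then true else fc
      let fe := if c = enemy then true else fe
      if fc && fe then "None" else pvLoopA board turn enemy y rest fc fe

def horizontal_winning_row (board : List (List String)) (turn : String) (x : Int) (y : Int) : String :=
  let enemyColor := if turn = "red" then "yellow" else "red"
  pvLoopA board turn enemyColor y (PySem.List.pyRange x (x + 4) 1) false false

-- ===== PORT B =====
-- tail-recursive scan of rows i..hi-1 keeping the single colour seen so far (owner);
-- recursion on the distance hi - i
def pvClassify (board : List (List String)) (turn enemy : String) (y : Int) (hi : Int)
    (owner : Option String) (truncated : Bool) (i : Int) : String :=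
  if h : hi ≤ i then
    if truncated then "None" else match owner with | none => "None" | some o => o
  else
    let c := pvCell board y i
    if c = turn ∨ c = enemy then
      if (match owner with | some o => o != c | none => false) then "None"
      else pvClassify board turn enemy y hi (some c) truncated (i + 1)
    else pvClassify board turn enemy y hi owner truncated (i + 1)
termination_by (hi - i).toNat
decreasing_by all_goals (simp at h; omega)

def horizontal_winning_row_alt (board : List (List String)) (turn : String) (x : Int) (y : Int) : String :=
  let enemyColor := if turn = "red" then "yellow" else "red"
  pvClassify board turn enemyColor y (min (x + 4) 7) none (decide (7 < x + 4)) x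

-- ===== PRECONDITION & SPEC =====
-- Pre_ holds exactly where Python A returns (no IndexError): every index i the scan can reach
-- (x ≤ i < min(x+4,7)) must have board[i][y] defined, unless both colours already occur strictly
-- before i (then A has conflict-returned "None" before reading cell i).
def Pre_horizontal_winning_row (board : List (List String)) (turn : String) (x : Int) (y : Int) : Prop :=
  ∀ i ∈ PySem.List.pyRange x (min (x + 4) 7) 1,
    (((PySem.List.pyRange x i 1).map (pvCell board y)).contains turn = true
      ∧ ((PySem.List.pyRange x i 1).map (pvCell board y)).contains
          (if turn = "red" then "yellow" else "red") = true)
    ∨ ((PySem.List.pyGet? board i).bind (fun row => PySem.List.pyGet? row y)).isSome = true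

instance (board : List (List String)) (turn : String) (x : Int) (y : Int) : Decidable (Pre_horizontal_winning_row board turn x y) := by unfold Pre_horizontal_winning_row; infer_instance

def pvWitness_horizontal_winning_row : List (List String) × String × Int × Int :=
  ([["red"], ["x"], ["x"], ["x"], ["x"], ["x"], ["x"]], "red", 0, 0)

def Spec_horizontal_winning_row (board : List (List String)) (turn : String) (x : Int) (y : Int) (out : String) : Prop := out = horizontal_winning_row_alt board turn x y
instance (board : List (List String)) (turn : String) (x : Int) (y : Int) (out : String) : Decidable (Spec_horizontal_winning_row board turn x y out) := by unfold Spec_horizontal_winning_row; infer_instance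

-- ===== CLAIM (what is proved, stated in full; the proofs are below) =====
def Claim_equal_horizontal_winning_row : Prop := ∀ (board : List (List String)) (turn : String) (x : Int) (y : Int), Dom_horizontal_winning_row board turn x y → Pre_horizontal_winning_row board turn x y → Spec_horizontal_winning_row board turn x y (horizontal_winning_row board turn x y)

-- ===== LEMMAS AND PROOFS =====

-- the state correspondence between A's two flags and B's single owner
def pvOwnerOf (turn enemy : String) (fc fe : Bool) : Option String :=
  if fc then some turn else if fe then some enemy else none

-- core simulation: A's flag loop over pyRange i (x+4) equals B's capped owner scan from i,
-- provided turn ≠ enemy, the flags are not both set, and i ≤ 7 whenever 7 < x+4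
theorem pvLoop_sim (board : List (List String)) (turn enemy : String) (y : Int) (x4 : Int)
    (hne : turn ≠ enemy) :
    ∀ n i (fc fe : Bool), (x4 - i).toNat = n → ¬(fc = true ∧ fe = true) →
      (i < x4 ∨ i ≤ 7) →
      pvLoopA board turn enemy y (PySem.List.pyRange i x4 1) fc fe =
        pvClassify board turn enemy y (min x4 7) (pvOwnerOf turn enemy fc fe)
          (decide (7 < x4)) i := by
  intro n
  induction n using Nat.strong_induction_on with
  | _ n ih =>
    intro i fc fe hn hff h7
    by_cases hix : i < x4
    · rw [PySem.List.pyRange_one_cons hix]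
      simp only [pvLoopA]
      by_cases hi7 : 7 ≤ i
      · -- A returns "None" at the bound; B's cap makes hi ≤ i and truncated is true
        rw [if_pos hi7, pvClassify.eq_def]
        rw [dif_pos (by omega : min x4 7 ≤ i), if_pos (by simp; omega)]
      · rw [if_neg hi7, pvClassify.eq_def]
        rw [dif_neg (by omega : ¬ (min x4 7 ≤ i))]
        have hrec : ∀ (ow : Option String) (fc' fe' : Bool),
            ow = pvOwnerOf turn enemy fc' fe' → ¬(fc' = true ∧ fe' = true) →
            pvLoopA board turn enemy y (PySem.List.pyRange (i+1) x4 1) fc' fe' =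
              pvClassify board turn enemy y (min x4 7) ow (decide (7 < x4)) (i + 1) := by
          intro ow fc' fe' how hff'
          rw [how]
          exact ih (x4 - (i+1)).toNat (by omega) (i+1) fc' fe' rfl hff' (Or.inr (by omega))
        have rT := hrec (some turn) true false (by simp [pvOwnerOf]) (by simp)
        have rE := hrec (some enemy) false true (by simp [pvOwnerOf]) (by simp)
        have rN := hrec none false false (by simp [pvOwnerOf]) (by simp)
        by_cases h1 : pvCell board y i = turn
        · have h2 : pvCell board y i ≠ enemy := by rw [h1]; exact hne
          cases fc <;> cases fe
          · simp [pvOwnerOf, h1, hne, rT]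
          · simp [pvOwnerOf, h1, hne, Ne.symm hne]
          · simp [pvOwnerOf, h1, hne, rT]
          · exact absurd ⟨rfl, rfl⟩ hff
        · by_cases h2 : pvCell board y i = enemy
          · cases fc <;> cases fe
            · simp [pvOwnerOf, h2, Ne.symm hne, rE]
            · simp [pvOwnerOf, h2, Ne.symm hne, rE]
            · simp [pvOwnerOf, h2, hne]
            · exact absurd ⟨rfl, rfl⟩ hff
          · cases fc <;> cases fe
            · simp [pvOwnerOf, h1, h2, rN]
            · simp [pvOwnerOf, h1, h2, rE]
            · simp [pvOwnerOf, h1, h2, rT]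
            · exact absurd ⟨rfl, rfl⟩ hff
    · rw [PySem.List.pyRange_one_eq_nil (by omega)]
      simp only [pvLoopA]
      have h7' : ¬ (7 < x4) := by omega
      rw [pvClassify.eq_def, dif_pos (by omega)]
      cases fc <;> cases fe
      · simp [pvOwnerOf, h7']
      · simp [pvOwnerOf, h7']
      · simp [pvOwnerOf, h7']
      · exact absurd ⟨rfl, rfl⟩ hff

-- ===== VERDICT (by name: the statement is the Claim_ definition above) =====
theorem horizontal_winning_row_spec : Claim_equal_horizontal_winning_row := by
  intro board turn x y _ _
  unfold Spec_horizontal_winning_row horizontal_winning_row horizontal_winning_row_alt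
  exact pvLoop_sim board turn (if turn = "red" then "yellow" else "red") y (x + 4)
    (by by_cases h : turn = "red" <;> simp [h])
    (x + 4 - x).toNat x false false rfl (by simp) (Or.inl (by omega))
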